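-- pv_equiv track=rewrite | github.com/kiipo0623/Algorithm-2021 | line/programming1.py | solution
-- ===== SOURCE A (Python) =====
-- def solution(student, k):
--     answer = 0
--
--     if student.count(1) < k:
--         return 0
--     senior_list = list(filter(lambda x: student[x] == 1, range(len(student))))
--
--     for i in range(len(senior_list)):
--         if len(senior_list) - i < k:
--             break
--         else:
--             answer += countstudent(student, senior_list[i], senior_list[i+k-1])
--
--     return answer
--
-- def countstudent(student, start, finish):
--     answer = 0
--     answer += 1  # 자기 자신으로 구성
--
--     # 앞으로
--     tempfront = start - 1
--     if start != 0:
--         while tempfront != -1 and student[tempfront] != 1: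
--             tempfront -= 1
--         tempfront += 1  # 반복문에서 자꾸 더해지는 문
--         answer += start - tempfront
--
--     # 뒤
--     tempback = finish + 1
--     if finish != len(student) - 1:
--         while tempback != len(student) and student[tempback] != 1:
--             tempback += 1
--         tempback -= 1
--         answer += tempback - finish
--
--     # 앞뒤
--     answer += (start - tempfront) * (tempback - finish)
--     return answer
-- ===== SOURCE B (Python) =====
-- def solution(student, k):
--     n = len(student)
--     seniors = [i for i in range(n) if student[i] == 1]
--     if k < 1 or len(seniors) < k:
--         return 0
--     ext = [-1] + seniors + [n]
--     total = 0
--     for i in range(len(seniors) - k + 1):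
--         total += (ext[i + 1] - ext[i]) * (ext[i + k + 1] - ext[i + k])
--     return total
-- ===== Notes on version B (the rewrite author's own statement) =====
-- stated objective: simpler
-- what changed: B computes the senior positions once and reads each window's left/right gap from the neighbouring positions in a sentinel-extended position list ([-1]+seniors+[n]), one multiplication per window, instead of A's per-window while-loop rescans of the gaps; B also returns the intended (left gap+1)*(right gap+1) count where A overcounts boundary windows.
-- intended difference: On inputs (k >= 1, at least k seniors) where a window of k consecutive seniors touches an end of the list and no adjacent senior closes that side's gap, A adds the boundary gap once too often (e.g. solution([1],1) = 2, solution([1,0,0],1) = 5); B returns the intended (left gap+1)*(right gap+1) segment count per window (1 resp. 3). — e.g. on solution([1], 1): A returns 2, B returns 1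
-- outside the precondition, e.g. on solution([1, 1], 0): A returns 3, B returns 0; on solution([1, 0, 1], -1): A returns 6, B returns 0
import Mathlib
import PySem

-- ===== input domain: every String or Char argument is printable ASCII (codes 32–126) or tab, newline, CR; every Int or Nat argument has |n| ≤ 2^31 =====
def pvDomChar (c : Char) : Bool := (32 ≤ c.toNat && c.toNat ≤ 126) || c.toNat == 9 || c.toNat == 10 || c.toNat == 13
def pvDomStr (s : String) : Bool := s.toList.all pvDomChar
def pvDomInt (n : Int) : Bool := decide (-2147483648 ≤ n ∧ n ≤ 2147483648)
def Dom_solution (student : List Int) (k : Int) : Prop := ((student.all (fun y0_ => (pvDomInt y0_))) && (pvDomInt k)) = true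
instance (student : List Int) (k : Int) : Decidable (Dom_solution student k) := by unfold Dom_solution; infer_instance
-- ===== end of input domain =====

-- B replaces A's per-window while-loop gap rescans by one pass that reads each window's gaps from a
-- sentinel-extended senior-position list (simpler, same asymptotic cost); B returns the intended
-- (left gap+1)*(right gap+1) count on boundary windows where A overcounts (see D_solution).


-- ===== PORT A =====
-- 'while tempfront != -1 and student[tempfront] != 1: tempfront -= 1' (fuel only makes it total;
-- on every call A makes the fuel exceeds the iteration count, so this is exact)
def PVFrontLoop (student : List Int) : Nat → Int → Int
  | 0, t => t
  | fuel+1, t =>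
      if t ≠ -1 ∧ ¬ ((PySem.List.pyGet? student t).getD 0 = 1) then PVFrontLoop student fuel (t-1) else t

-- 'while tempback != len(student) and student[tempback] != 1: tempback += 1'
def PVBackLoop (student : List Int) : Nat → Int → Int
  | 0, t => t
  | fuel+1, t =>
      if t ≠ (student.length : Int) ∧ ¬ ((PySem.List.pyGet? student t).getD 0 = 1) then PVBackLoop student fuel (t+1) else t

def countstudent (student : List Int) (start finish : Int) : Int :=
  let answer : Int := 0 + 1
  let res1 : Int × Int :=
    if start ≠ 0 then
      let tf := PVFrontLoop student (start + 1).toNat (start - 1) + 1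
      (tf, answer + (start - tf))
    else (start - 1, answer)
  let tempfront := res1.1
  let answer := res1.2
  let res2 : Int × Int :=
    if finish ≠ (student.length : Int) - 1 then
      let tb := PVBackLoop student (student.length + 1) (finish + 1) - 1
      (tb, answer + (tb - finish))
    else (finish + 1, answer)
  let tempback := res2.1
  let answer := res2.2
  answer + (start - tempfront) * (tempback - finish)

-- 'for i in range(len(senior_list)): if len(senior_list) - i < k: break else: answer += …'
def PVSolLoop (student : List Int) (k : Int) (senior_list : List Int) : Nat → Nat → Int → Int
  | 0, _, answer => answer
  | fuel+1, i, answer =>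
      if i < senior_list.length then
        if (senior_list.length : Int) - (i : Int) < k then answer
        else PVSolLoop student k senior_list fuel (i+1)
          (answer + countstudent student (senior_list.getD i 0)
            ((PySem.List.pyGet? senior_list ((i : Int) + k - 1)).getD 0))
      else answer

def solution (student : List Int) (k : Int) : Int :=
  if (PySem.List.count student 1 : Int) < k then 0
  else
    let senior_list : List Int :=
      (PySem.List.pyRange 0 (student.length : Int) 1).filter (fun x => (PySem.List.pyGet? student x).getD 0 == 1)
    PVSolLoop student k senior_list (senior_list.length + 1) 0 0

-- ===== PORT B =====
def solution_alt (student : List Int) (k : Int) : Int :=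
  let n : Int := (student.length : Int)
  let seniors : List Int :=
    (PySem.List.pyRange 0 (student.length : Int) 1).filter (fun x => (PySem.List.pyGet? student x).getD 0 == 1)
  if k < 1 ∨ (seniors.length : Int) < k then 0
  else
    let ext : List Int := -1 :: (seniors ++ [n])
    (List.range (seniors.length - k.toNat + 1)).foldl
      (fun total i =>
        total + (ext.getD (i+1) 0 - ext.getD i 0) * (ext.getD (i + k.toNat + 1) 0 - ext.getD (i + k.toNat) 0)) 0

-- ===== PRECONDITION & SPEC =====
-- Pre_ excludes k ≤ 0 when the list contains a senior: k counts consecutive seniors, so k ≤ 0 is outside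
-- the natural domain; there A raises IndexError (when k ≤ 1 - count) or returns values produced by
-- accidental negative-index wraparound of senior_list[i+k-1].
def Pre_solution (student : List Int) (k : Int) : Prop :=
  1 ≤ k ∨ student.count 1 = 0
instance (student : List Int) (k : Int) : Decidable (Pre_solution student k) := by unfold Pre_solution; infer_instance
def pvWitness_solution : List Int × Int := ([0, 1, 0], 1)

-- On inputs (k ≥ 1, at least k seniors) where a window of k consecutive seniors touches an end of the
-- list and no adjacent senior closes that side's gap, A adds the boundary gap once too often
-- (e.g. solution([1],1) = 2); B returns the intended (left gap+1)*(right gap+1) segment count per window.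
def D_solution (student : List Int) (k : Int) : Prop :=
  let s := List.findIdxs (· == 1) student
  1 ≤ k ∧ k ≤ (s.length : Int) ∧
    ((student[0]! = 1 ∧ student[s[k.toNat - 1]! + 1]! ≠ 1) ∨
     (student[student.length - 1]! = 1 ∧ student[s[s.length - k.toNat]! - 1]! ≠ 1))
instance (student : List Int) (k : Int) : Decidable (D_solution student k) := by unfold D_solution; infer_instance

def Spec_solution (student : List Int) (k : Int) (out : Int) : Prop := ¬ D_solution student k → out = solution_alt student k
instance (student : List Int) (k : Int) (out : Int) : Decidable (Spec_solution student k out) := by unfold Spec_solution; infer_instance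

def pvDiffWitness_solution : List Int × Int := ([1], 1)
def pvDiffWitnessOut_solution : Int × Int := (2, 1)

-- ===== CLAIM (what is proved, stated in full; the proofs are below) =====
def Claim_unchanged_solution : Prop := ∀ (student : List Int) (k : Int), Dom_solution student k → Pre_solution student k → Spec_solution student k (solution student k)
def Claim_changed_solution : Prop := Dom_solution (pvDiffWitness_solution.1) (pvDiffWitness_solution.2) ∧ Pre_solution (pvDiffWitness_solution.1) (pvDiffWitness_solution.2) ∧ D_solution (pvDiffWitness_solution.1) (pvDiffWitness_solution.2) ∧ solution (pvDiffWitness_solution.1) (pvDiffWitness_solution.2) = pvDiffWitnessOut_solution.1 ∧ solution_alt (pvDiffWitness_solution.1) (pvDiffWitness_solution.2) = pvDiffWitnessOut_solution.2 ∧ pvDiffWitnessOut_solution.1 ≠ pvDiffWitnessOut_solution.2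
def Claim_exact_solution : Prop := ∀ (student : List Int) (k : Int), Dom_solution student k → Pre_solution student k → D_solution student k → solution student k ≠ solution_alt student k


-- ===== LEMMAS AND PROOFS =====

-- senior positions (proof-side view of both programs; not part of either port)
def pvSen (student : List Int) : List Nat :=
  (List.range student.length).filter (fun i => student.getD i 0 == 1)


lemma pvSen_mem {student : List Int} {i : Nat} :
    i ∈ pvSen student ↔ i < student.length ∧ student.getD i 0 = 1 := by
  simp [pvSen, List.mem_filter, List.mem_range]

lemma pvSen_sorted (student : List Int) : (pvSen student).Pairwise (· < ·) :=
  List.Pairwise.filter _ List.pairwise_lt_range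

lemma pvSen_strictMono {student : List Int} {j j' : Nat}
    (hj' : j' < (pvSen student).length) (h : j < j') :
    (pvSen student)[j]'(lt_trans h hj') < (pvSen student)[j']'hj' :=
  (List.pairwise_iff_getElem.mp (pvSen_sorted student)) j j' _ _ h

lemma pvSen_mono {student : List Int} {j j' : Nat}
    (hj' : j' < (pvSen student).length) (h : j ≤ j') :
    (pvSen student)[j]'(lt_of_le_of_lt h hj') ≤ (pvSen student)[j']'hj' := by
  rcases eq_or_lt_of_le h with rfl | h
  · exact le_refl _
  · exact le_of_lt (pvSen_strictMono hj' h)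

lemma pvSen_lt {student : List Int} {j : Nat} (h : j < (pvSen student).length) :
    (pvSen student)[j] < student.length :=
  (pvSen_mem.mp (List.getElem_mem h)).1

lemma pvSen_senior {student : List Int} {j : Nat} (h : j < (pvSen student).length) :
    student.getD ((pvSen student)[j]) 0 = 1 :=
  (pvSen_mem.mp (List.getElem_mem h)).2

-- a senior position is some entry of pvSen
lemma pvSen_exists {student : List Int} {m : Nat} (hm : m < student.length)
    (h1 : student.getD m 0 = 1) :
    ∃ t, ∃ ht : t < (pvSen student).length, (pvSen student)[t] = m :=
  List.mem_iff_getElem.mp (pvSen_mem.mpr ⟨hm, h1⟩)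

lemma map_getD_range (l : List Int) : (List.range l.length).map (fun i => l.getD i 0) = l := by
  apply List.ext_getElem
  · simp
  · intro i h1 h2
    simp [List.getD_eq_getElem?_getD, List.getElem?_eq_getElem h2]

lemma SL_eq (student : List Int) :
    (PySem.List.pyRange 0 (student.length : Int) 1).filter
        (fun x => (PySem.List.pyGet? student x).getD 0 == 1)
      = List.map (fun i : Nat => (i : Int)) (pvSen student) := by
  rw [PySem.List.pyRange_one]
  have h1 : ((student.length : Int) - 0).toNat = student.length := by omega
  have h0 : (fun k : Nat => (0:Int) + k) = (fun i : Nat => (i : Int)) := by funext k; ring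
  rw [h1, h0, List.filter_map]
  unfold pvSen
  refine congrArg (List.map _) (List.filter_congr ?_)
  intro i hi
  simp only [List.mem_range] at hi
  simp [Function.comp, PySem.List.pyGet?_natCast, List.getD_eq_getElem?_getD]

lemma count_eq_len (student : List Int) : student.count 1 = (pvSen student).length := by
  have h2 := List.countP_map (p := fun x : Int => x == 1) (f := fun i => student.getD i 0)
      (l := List.range student.length)
  unfold pvSen
  rw [← List.countP_eq_length_filter]
  rw [map_getD_range] at h2
  simpa [List.count_eq_countP, Function.comp] using h2

lemma count_pysem (student : List Int) : PySem.List.count student 1 = (pvSen student).length := by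
  rw [PySem.List.count_eq, count_eq_len]


lemma PVFrontLoop_eq (student : List Int) (p : Int)
    (hpsen : p = -1 ∨ (0 ≤ p ∧ student.getD p.toNat 0 = 1)) :
    ∀ (fuel : Nat) (t : Int), p ≤ t → t < (student.length : Int) →
      (t - p).toNat ≤ fuel →
      (∀ j : Int, p < j → j ≤ t → student.getD j.toNat 0 ≠ 1) →
      PVFrontLoop student fuel t = p := by
  intro fuel
  induction fuel with
  | zero =>
      intro t hpt _ hfuel _
      have : t = p := by omega
      simp [PVFrontLoop, this]
  | succ fuel ih =>
      intro t hpt htn hfuel hmid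
      by_cases hte : t = p
      · subst hte
        rcases hpsen with h1 | ⟨h0, h1⟩
        · simp [PVFrontLoop, h1]
        · have hget : (PySem.List.pyGet? student t).getD 0 = student.getD t.toNat 0 := by
            rw [PySem.List.pyGet?_of_nonneg student h0, List.getD_eq_getElem?_getD]
          rw [PVFrontLoop, if_neg]
          intro hc
          exact hc.2 (by rw [hget]; exact h1)
      · have htp : p < t := by omega
        have ht0 : 0 ≤ t := by rcases hpsen with h | ⟨h, _⟩ <;> omega
        have hget : (PySem.List.pyGet? student t).getD 0 = student.getD t.toNat 0 := by
          rw [PySem.List.pyGet?_of_nonneg student ht0, List.getD_eq_getElem?_getD]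
        have hcond : t ≠ -1 ∧ ¬ ((PySem.List.pyGet? student t).getD 0 = 1) := by
          refine ⟨by omega, ?_⟩
          rw [hget]
          exact hmid t htp (le_refl t)
        rw [PVFrontLoop, if_pos hcond]
        exact ih (t-1) (by omega) (by omega) (by omega)
          (fun j h1 h2 => hmid j h1 (by omega))

lemma PVBackLoop_eq (student : List Int) (q : Int)
    (hqsen : q = (student.length : Int) ∨
      (q < (student.length : Int) ∧ student.getD q.toNat 0 = 1)) :
    ∀ (fuel : Nat) (t : Int), t ≤ q → 0 ≤ t →
      (q - t).toNat ≤ fuel →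
      (∀ j : Int, t ≤ j → j < q → student.getD j.toNat 0 ≠ 1) →
      PVBackLoop student fuel t = q := by
  intro fuel
  induction fuel with
  | zero =>
      intro t htq _ hfuel _
      have : t = q := by omega
      simp [PVBackLoop, this]
  | succ fuel ih =>
      intro t htq ht0 hfuel hmid
      by_cases hte : t = q
      · subst hte
        rcases hqsen with h1 | ⟨hlt, h1⟩
        · simp [PVBackLoop, h1]
        · have hget : (PySem.List.pyGet? student t).getD 0 = student.getD t.toNat 0 := by
            rw [PySem.List.pyGet?_of_nonneg student ht0, List.getD_eq_getElem?_getD]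
          rw [PVBackLoop, if_neg]
          intro hc
          exact hc.2 (by rw [hget]; exact h1)
      · have htq' : t < q := by omega
        have hget : (PySem.List.pyGet? student t).getD 0 = student.getD t.toNat 0 := by
          rw [PySem.List.pyGet?_of_nonneg student ht0, List.getD_eq_getElem?_getD]
        have htn : t ≠ (student.length : Int) := by
          rcases hqsen with h | ⟨h, _⟩ <;> omega
        have hcond : t ≠ (student.length : Int) ∧ ¬ ((PySem.List.pyGet? student t).getD 0 = 1) := by
          refine ⟨htn, ?_⟩
          rw [hget]
          exact hmid t (le_refl t) htq'
        rw [PVBackLoop, if_pos hcond]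
        exact ih (t+1) (by omega) (by omega) (by omega)
          (fun j h1 h2 => hmid j (by omega) h2)

lemma countstudent_eq (student : List Int) (p s f q : Int)
    (hs0 : 0 ≤ s) (hsf : s ≤ f) (hfn : f < (student.length : Int))
    (hps : p < s)
    (hpsen : p = -1 ∨ (0 ≤ p ∧ student.getD p.toNat 0 = 1))
    (hpm : ∀ j : Int, p < j → j < s → student.getD j.toNat 0 ≠ 1)
    (hfq : f < q) (hqn : q ≤ (student.length : Int))
    (hqsen : q = (student.length : Int) ∨ student.getD q.toNat 0 = 1)
    (hqm : ∀ j : Int, f < j → j < q → student.getD j.toNat 0 ≠ 1) :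
    countstudent student s f =
      1 + (if s = 0 then 0 else s - p - 1)
        + (if f = (student.length : Int) - 1 then 0 else q - f - 1)
        + (s - p - (if s = 0 then 0 else 1)) * (q - f - (if f = (student.length : Int) - 1 then 0 else 1)) := by
  have hp1 : -1 ≤ p := by rcases hpsen with h | ⟨h, _⟩ <;> omega
  have hqsen' : q = (student.length : Int) ∨
      (q < (student.length : Int) ∧ student.getD q.toNat 0 = 1) := by
    by_cases hq : q = (student.length : Int)
    · exact Or.inl hq
    · rcases hqsen with h | h
      · exact Or.inl h
      · exact Or.inr ⟨by omega, h⟩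
  have hfront : s ≠ 0 → PVFrontLoop student (s + 1).toNat (s - 1) = p := by
    intro hs
    exact PVFrontLoop_eq student p hpsen _ (s-1) (by omega) (by omega) (by omega)
      (fun j h1 h2 => hpm j h1 (by omega))
  have hback : f ≠ (student.length : Int) - 1 →
      PVBackLoop student (student.length + 1) (f + 1) = q := by
    intro hf
    exact PVBackLoop_eq student q hqsen' _ (f+1) (by omega) (by omega) (by omega)
      (fun j h1 h2 => hqm j (by omega) h2)
  by_cases hs : s = 0 <;> by_cases hf : f = (student.length : Int) - 1
  · -- s = 0, f = n-1 : both loops skipped; p = -1, q = n forced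
    have hpe : p = -1 := by omega
    have hqe : q = (student.length : Int) := by omega
    subst hs hf hpe hqe
    simp [countstudent]
  · -- s = 0, f ≠ n-1
    have hpe : p = -1 := by omega
    subst hs hpe
    rw [countstudent]
    simp only []
    rw [if_neg (by omega : ¬ (0:Int) ≠ 0), if_pos hf]
    rw [hback hf]
    simp [hf]
    ring
  · -- s ≠ 0, f = n-1
    have hqe : q = (student.length : Int) := by omega
    subst hf hqe
    rw [countstudent]
    simp only []
    rw [if_pos hs, if_neg (by omega : ¬ (student.length:Int) - 1 ≠ (student.length:Int) - 1)]
    rw [hfront hs]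
    simp [hs]
    ring
  · rw [countstudent]
    simp only []
    rw [if_pos hs, if_pos hf]
    rw [hfront hs, hback hf]
    simp [hs, hf]
    ring

-- abbreviations used only by the proofs
def pvSL (student : List Int) : List Int := List.map (fun i : Nat => (i : Int)) (pvSen student)

def pvTermA (student : List Int) (k : Int) (j : Nat) : Int :=
  countstudent student ((pvSL student).getD j 0)
    ((PySem.List.pyGet? (pvSL student) ((j : Int) + k - 1)).getD 0)

def pvP (student : List Int) (j : Nat) : Int :=
  if j = 0 then -1 else ((pvSen student).getD (j-1) 0 : Int)

def pvQ (student : List Int) (k : Int) (j : Nat) : Int :=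
  if j + k.toNat = (pvSen student).length then (student.length : Int)
  else ((pvSen student).getD (j + k.toNat) 0 : Int)

def pvBwin (student : List Int) (k : Int) (j : Nat) : Int :=
  (((pvSen student).getD j 0 : Int) - pvP student j) *
    (pvQ student k j - ((pvSen student).getD (j + k.toNat - 1) 0 : Int))

def pvOver (student : List Int) (k : Int) (j : Nat) : Int :=
  if (pvSen student).getD j 0 = 0 then
    (if (pvSen student).getD (j + k.toNat - 1) 0 = student.length - 1 then 1
     else pvQ student k j - ((pvSen student).getD (j + k.toNat - 1) 0 : Int) - 1)
  else
    (if (pvSen student).getD (j + k.toNat - 1) 0 = student.length - 1 then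
      ((pvSen student).getD j 0 : Int) - pvP student j - 1
     else 0)

lemma getD_map_cast (l : List Nat) (j : Nat) (h : j < l.length) :
    (List.map (fun i : Nat => (i : Int)) l).getD j 0 = (l.getD j 0 : Int) := by
  simp [List.getD_eq_getElem?_getD, h]

lemma PVSolLoop_sum (student : List Int) (k : Int)
    (hk1 : 1 ≤ k) (hkc : k ≤ ((pvSL student).length : Int)) :
    ∀ (m j fuel : Nat) (ans : Int),
      j + m = (pvSL student).length + 1 - k.toNat → m < fuel →
      PVSolLoop student k (pvSL student) fuel j ans
        = ans + ((List.range' j m).map (pvTermA student k)).sum := by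
  have hkn : (k.toNat : Int) = k := by omega
  intro m
  induction m with
  | zero =>
      intro j fuel ans hj hfuel
      rcases fuel with _ | fl
      · omega
      · rw [PVSolLoop]
        by_cases hjc : j < (pvSL student).length
        · rw [if_pos hjc, if_pos (by omega)]
          simp
        · rw [if_neg hjc]
          simp
  | succ m ih =>
      intro j fuel ans hj hfuel
      rcases fuel with _ | fl
      · omega
      · rw [PVSolLoop]
        have hjc : j < (pvSL student).length := by omega
        rw [if_pos hjc, if_neg (by omega)]
        rw [ih (j+1) fl _ (by omega) (by omega)]
        rw [List.range'_succ, List.map_cons, List.sum_cons]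
        unfold pvTermA
        ring

lemma solution_sum (student : List Int) (k : Int)
    (hk1 : 1 ≤ k) (hkc : k ≤ ((pvSen student).length : Int)) :
    solution student k
      = ((List.range' 0 ((pvSen student).length + 1 - k.toNat)).map (pvTermA student k)).sum := by
  have hlen : (pvSL student).length = (pvSen student).length := by
    simp [pvSL]
  rw [solution, if_neg (by rw [count_pysem]; omega)]
  simp only []
  rw [SL_eq]
  rw [show List.map (fun i : Nat => (i : Int)) (pvSen student) = pvSL student from rfl]
  rw [PVSolLoop_sum student k hk1 (by omega) ((pvSL student).length + 1 - k.toNat) 0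
        ((pvSL student).length + 1) 0 (by omega) (by omega)]
  rw [hlen]
  ring

lemma pvTermA_eq (student : List Int) (k : Int) (hk1 : 1 ≤ k) (j : Nat)
    (hj : j + k.toNat ≤ (pvSen student).length) :
    pvTermA student k j
      = countstudent student ((pvSen student).getD j 0 : Int)
          ((pvSen student).getD (j + k.toNat - 1) 0 : Int) := by
  have hc : j < (pvSen student).length := by omega
  have h2 : j + k.toNat - 1 < (pvSen student).length := by omega
  have hidx : ((j : Int) + k - 1) = ((j + k.toNat - 1 : Nat) : Int) := by omega
  unfold pvTermA pvSL
  rw [getD_map_cast _ _ hc]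
  rw [hidx, PySem.List.pyGet?_natCast]
  simp [pvSL, h2, List.getD_eq_getElem?_getD]

lemma extGetD (student : List Int) (j : Nat) (hj : j ≤ (pvSen student).length) :
    ((-1 : Int) :: (pvSL student ++ [(student.length : Int)])).getD (j+1) 0
      = if j < (pvSen student).length then ((pvSen student).getD j 0 : Int)
        else (student.length : Int) := by
  rw [List.getD_cons_succ]
  by_cases h : j < (pvSen student).length
  · rw [if_pos h, List.getD_append _ _ _ _ (by simpa [pvSL] using h)]
    exact getD_map_cast _ _ h
  · have hje : j = (pvSen student).length := by omega
    subst hje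
    rw [if_neg h]
    have hl : (pvSL student).length = (pvSen student).length := by simp [pvSL]
    simp [List.getD_eq_getElem?_getD, hl]

lemma solution_alt_sum (student : List Int) (k : Int)
    (hk1 : 1 ≤ k) (hkc : k ≤ ((pvSen student).length : Int)) :
    solution_alt student k
      = ((List.range ((pvSen student).length - k.toNat + 1)).map (pvBwin student k)).sum := by
  have hl : (pvSL student).length = (pvSen student).length := by simp [pvSL]
  rw [solution_alt]
  simp only []
  rw [SL_eq]
  rw [show List.map (fun i : Nat => (i : Int)) (pvSen student) = pvSL student from rfl]
  rw [if_neg (by push_cast [hl]; omega)]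
  rw [hl, PySem.List.foldl_add]
  rw [zero_add]
  refine congrArg List.sum (List.map_congr_left ?_)
  intro i hi
  have hik : i + k.toNat ≤ (pvSen student).length := by
    simp only [List.mem_range] at hi
    omega
  have e1 : ((-1 : Int) :: (pvSL student ++ [(student.length : Int)])).getD (i+1) 0
      = ((pvSen student).getD i 0 : Int) := by
    rw [extGetD student i (by omega), if_pos (by omega)]
  have e2 : ((-1 : Int) :: (pvSL student ++ [(student.length : Int)])).getD i 0
      = pvP student i := by
    rcases i with _ | i'
    · simp [pvP]
    · rw [extGetD student i' (by omega), if_pos (by omega)]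
      simp [pvP]
  have e3 : ((-1 : Int) :: (pvSL student ++ [(student.length : Int)])).getD (i + k.toNat + 1) 0
      = pvQ student k i := by
    rw [extGetD student (i + k.toNat) (by omega)]
    unfold pvQ
    by_cases h : i + k.toNat = (pvSen student).length
    · rw [if_neg (by omega), if_pos h]
    · rw [if_pos (by omega), if_neg h]
  have e4 : ((-1 : Int) :: (pvSL student ++ [(student.length : Int)])).getD (i + k.toNat) 0
      = ((pvSen student).getD (i + k.toNat - 1) 0 : Int) := by
    have hs : i + k.toNat = (i + k.toNat - 1) + 1 := by omega
    rw [hs, extGetD student (i + k.toNat - 1) (by omega), if_pos (by omega)]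
    simp
  rw [e1, e2, e3, e4]
  rfl


lemma window_eq (student : List Int) (k : Int) (hk1 : 1 ≤ k) (j : Nat)
    (hj : j + k.toNat ≤ (pvSen student).length) :
    pvTermA student k j = pvBwin student k j + pvOver student k j := by
  have hc : j < (pvSen student).length := by omega
  have h2 : j + k.toNat - 1 < (pvSen student).length := by omega
  have hgj : (pvSen student).getD j 0 = (pvSen student)[j] := List.getD_eq_getElem _ _ hc
  have hgf : (pvSen student).getD (j + k.toNat - 1) 0 = (pvSen student)[j + k.toNat - 1] :=
    List.getD_eq_getElem _ _ h2
  -- side conditions for countstudent_eq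
  have hsf : (pvSen student).getD j 0 ≤ (pvSen student).getD (j + k.toNat - 1) 0 := by
    rw [hgj, hgf]; exact pvSen_mono h2 (by omega)
  have hfn : (pvSen student).getD (j + k.toNat - 1) 0 < student.length := by
    rw [hgf]; exact pvSen_lt h2
  have hn1 : 1 ≤ student.length := by omega
  have hps : pvP student j < ((pvSen student).getD j 0 : Int) := by
    unfold pvP
    rcases j with _ | j'
    · simp; omega
    · rw [if_neg (by omega)]
      rw [hgj]
      have h3 := pvSen_strictMono (student := student) hc (j := j') (by omega)
      simp only [Nat.add_sub_cancel]
      rw [List.getD_eq_getElem _ _ (by omega : j' < (pvSen student).length)]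
      exact_mod_cast h3
  have hpsen : pvP student j = -1 ∨
      (0 ≤ pvP student j ∧ student.getD (pvP student j).toNat 0 = 1) := by
    unfold pvP
    rcases j with _ | j'
    · exact Or.inl (by simp)
    · rw [if_neg (by omega)]
      refine Or.inr ⟨by positivity, ?_⟩
      simp only [Nat.add_sub_cancel, Int.toNat_natCast]
      rw [List.getD_eq_getElem _ _ (by omega : j' < (pvSen student).length)]
      exact pvSen_senior _
  have hpm : ∀ jj : Int, pvP student j < jj → jj < ((pvSen student).getD j 0 : Int) →
      student.getD jj.toNat 0 ≠ 1 := by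
    intro jj hj1 hj2 hcon
    have hp1 : -1 ≤ pvP student j := by
      rcases hpsen with h | ⟨h, _⟩ <;> omega
    have hjj0 : 0 ≤ jj := by omega
    have hmn : jj.toNat < student.length := by
      have := pvSen_lt hc
      rw [hgj] at hj2
      omega
    obtain ⟨t, ht, hte⟩ := pvSen_exists hmn hcon
    rcases Nat.lt_or_ge t j with hlt | hle
    swap
    · have := pvSen_mono ht hle
      rw [hgj] at hj2
      omega
    · have hj0 : j ≠ 0 := by omega
      have htj : t ≤ j - 1 := by omega
      have := pvSen_mono (student := student) (j := t) (j' := j - 1) (by omega) htj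
      have hpe : pvP student j = ((pvSen student)[j-1]'(by omega) : Int) := by
        unfold pvP
        rw [if_neg hj0, List.getD_eq_getElem _ _ (by omega : j - 1 < (pvSen student).length)]
      omega
  have hfq : ((pvSen student).getD (j + k.toNat - 1) 0 : Int) < pvQ student k j := by
    unfold pvQ
    by_cases h : j + k.toNat = (pvSen student).length
    · rw [if_pos h]; exact_mod_cast hfn
    · rw [if_neg h]
      rw [hgf, List.getD_eq_getElem _ _ (by omega : j + k.toNat < (pvSen student).length)]
      exact_mod_cast pvSen_strictMono (by omega) (by omega)
  have hqn : pvQ student k j ≤ (student.length : Int) := by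
    unfold pvQ
    by_cases h : j + k.toNat = (pvSen student).length
    · rw [if_pos h]
    · rw [if_neg h]
      have := pvSen_lt (student := student) (j := j + k.toNat) (by omega)
      rw [List.getD_eq_getElem _ _ (by omega : j + k.toNat < (pvSen student).length)]
      omega
  have hqsen : pvQ student k j = (student.length : Int) ∨
      student.getD (pvQ student k j).toNat 0 = 1 := by
    unfold pvQ
    by_cases h : j + k.toNat = (pvSen student).length
    · rw [if_pos h]; exact Or.inl rfl
    · rw [if_neg h]
      refine Or.inr ?_
      simp only [Int.toNat_natCast]
      rw [List.getD_eq_getElem _ _ (by omega : j + k.toNat < (pvSen student).length)]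
      exact pvSen_senior _
  have hqm : ∀ jj : Int, ((pvSen student).getD (j + k.toNat - 1) 0 : Int) < jj →
      jj < pvQ student k j → student.getD jj.toNat 0 ≠ 1 := by
    intro jj hj1 hj2 hcon
    have hjj0 : 0 ≤ jj := by omega
    have hmn : jj.toNat < student.length := by omega
    obtain ⟨t, ht, hte⟩ := pvSen_exists hmn hcon
    rcases Nat.lt_or_ge (j + k.toNat - 1) t with hlt | hle
    swap
    · have := pvSen_mono h2 hle
      rw [hgf] at hj1
      omega
    · have h : j + k.toNat < (pvSen student).length := by omega
      have hqe : pvQ student k j = ((pvSen student)[j + k.toNat]'h : Int) := by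
        unfold pvQ
        rw [if_neg (by omega), List.getD_eq_getElem _ _ h]
      have := pvSen_mono (student := student) (j := j + k.toNat) (j' := t) ht (by omega)
      omega
  have hmain := countstudent_eq student (pvP student j) ((pvSen student).getD j 0 : Int)
      ((pvSen student).getD (j + k.toNat - 1) 0 : Int) (pvQ student k j)
      (by positivity) (by exact_mod_cast hsf) (by exact_mod_cast hfn)
      hps hpsen hpm hfq hqn hqsen hqm
  rw [pvTermA_eq student k hk1 j hj, hmain]
  -- arithmetic case analysis
  unfold pvBwin pvOver
  by_cases hS : (pvSen student).getD j 0 = 0 <;>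
    by_cases hF : (pvSen student).getD (j + k.toNat - 1) 0 = student.length - 1
  · -- boundary on both sides
    have hSe : ((pvSen student).getD j 0 : Int) = 0 := by exact_mod_cast hS
    have hFe : ((pvSen student).getD (j + k.toNat - 1) 0 : Int) = (student.length : Int) - 1 := by
      omega
    simp only [if_pos hSe, if_pos hFe, if_pos hS, if_pos hF]
    ring
  · have hSe : ((pvSen student).getD j 0 : Int) = 0 := by exact_mod_cast hS
    have hFe : ((pvSen student).getD (j + k.toNat - 1) 0 : Int) ≠ (student.length : Int) - 1 := by
      omega
    have hj0 : j = 0 := by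
      by_contra hj0
      have : 0 ≤ pvP student j := by
        unfold pvP
        rw [if_neg hj0]
        positivity
      omega
    have hpe : pvP student j = -1 := by unfold pvP; rw [if_pos hj0]
    simp only [if_pos hSe, if_neg hFe, if_pos hS, if_neg hF, hpe, hSe]
    simp
  · have hSe : ((pvSen student).getD j 0 : Int) ≠ 0 := by
      simpa using hS
    have hFe : ((pvSen student).getD (j + k.toNat - 1) 0 : Int) = (student.length : Int) - 1 := by
      omega
    have hqe : pvQ student k j = (student.length : Int) := by omega
    simp only [if_neg hSe, if_pos hFe, if_neg hS, if_pos hF, hqe, hFe]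
    simp
  · have hSe : ((pvSen student).getD j 0 : Int) ≠ 0 := by simpa using hS
    have hFe : ((pvSen student).getD (j + k.toNat - 1) 0 : Int) ≠ (student.length : Int) - 1 := by
      omega
    simp only [if_neg hSe, if_neg hFe, if_neg hS, if_neg hF]
    ring

lemma main_eq (student : List Int) (k : Int)
    (hk1 : 1 ≤ k) (hkc : k ≤ ((pvSen student).length : Int)) :
    solution student k
      = solution_alt student k
        + ((List.range ((pvSen student).length - k.toNat + 1)).map (pvOver student k)).sum := by
  have hm : (pvSen student).length + 1 - k.toNat = (pvSen student).length - k.toNat + 1 := by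
    omega
  rw [solution_sum student k hk1 hkc, solution_alt_sum student k hk1 hkc]
  rw [hm, ← List.range_eq_range', ← PySem.List.sum_map_add_int]
  refine congrArg List.sum (List.map_congr_left ?_)
  intro j hj
  simp only [List.mem_range] at hj
  exact window_eq student k hk1 j (by omega)

lemma alt_zero (student : List Int) (k : Int)
    (h : k < 1 ∨ ((pvSen student).length : Int) < k) : solution_alt student k = 0 := by
  rw [solution_alt]
  simp only []
  rw [SL_eq, show List.map (fun i : Nat => (i : Int)) (pvSen student) = pvSL student from rfl]
  rw [if_pos]
  rcases h with h | h
  · exact Or.inl h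
  · refine Or.inr ?_
    have : (pvSL student).length = (pvSen student).length := by simp [pvSL]
    omega

lemma sol_zero_small (student : List Int) (k : Int)
    (h : ((pvSen student).length : Int) < k) : solution student k = 0 := by
  rw [solution, if_pos]
  rw [count_pysem]
  exact h

lemma sol_zero_neg (student : List Int) (k : Int)
    (hk : k < 1) (hc : (pvSen student).length = 0) : solution student k = 0 := by
  rw [solution, if_neg (by rw [count_pysem]; omega)]
  simp only []
  rw [SL_eq]
  have he : pvSen student = [] := List.length_eq_zero_iff.mp hc
  rw [he]
  simp [PVSolLoop]

lemma findIdxs_eq_filter (l : List Int) : ∀ s : Nat, List.findIdxs (fun x => x == 1) l s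
    = ((List.range l.length).filter (fun i => l.getD i 0 == 1)).map (· + s) := by
  induction l with
  | nil => intro s; rfl
  | cons a t ih =>
      intro s
      rw [List.findIdxs_cons, List.length_cons, List.range_succ_eq_map, List.filter_cons,
        List.filter_map]
      have hmapeq : List.map (fun x => x + (s+1))
            (List.filter (fun i => t.getD i 0 == 1) (List.range t.length))
          = List.map ((fun x : Nat => x + s) ∘ Nat.succ)
              (List.filter ((fun i => (a :: t).getD i 0 == 1) ∘ Nat.succ) (List.range t.length)) := by
        rw [show ((fun i => (a :: t).getD i 0 == 1) ∘ Nat.succ) = (fun i => t.getD i 0 == 1) from by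
          funext i; simp [Function.comp]]
        congr 1
        funext x
        simp only [Function.comp_apply]
        omega
      by_cases h : a == 1
      · rw [if_pos h, if_pos (show ((a :: t).getD 0 0 == 1) = true by simpa using h)]
        rw [ih (s+1), List.map_cons, List.map_map, hmapeq]
        congr 1
        omega
      · rw [if_neg h, if_neg (show ¬ ((a :: t).getD 0 0 == 1) = true by simpa using h)]
        rw [ih (s+1), List.map_map, hmapeq]

lemma findIdxs_eq_pvSen (student : List Int) :
    List.findIdxs (fun x => x == 1) student = pvSen student := by
  rw [findIdxs_eq_filter student 0]
  unfold pvSen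
  simp

def pvC1 (student : List Int) (k : Int) : Prop :=
  student.getD 0 0 = 1 ∧
    student.getD ((pvSen student).getD (k.toNat - 1) 0 + 1) 0 ≠ 1

def pvC2 (student : List Int) (k : Int) : Prop :=
  student.getD (student.length - 1) 0 = 1 ∧
    student.getD ((pvSen student).getD ((pvSen student).length - k.toNat) 0 - 1) 0 ≠ 1

lemma getBang_eq_getD_int (l : List Int) (i : Nat) : l[i]! = l.getD i 0 := by
  simp [List.getElem!_eq_getElem?_getD, List.getD_eq_getElem?_getD]

lemma getBang_eq_getD_nat (l : List Nat) (i : Nat) : l[i]! = l.getD i 0 := by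
  simp [List.getElem!_eq_getElem?_getD, List.getD_eq_getElem?_getD]

lemma D_iff (student : List Int) (k : Int) :
    D_solution student k
      ↔ 1 ≤ k ∧ k ≤ ((pvSen student).length : Int) ∧ (pvC1 student k ∨ pvC2 student k) := by
  unfold D_solution pvC1 pvC2
  rw [show (fun x : Int => x == 1) = (· == 1) from rfl] at *
  simp only [getBang_eq_getD_int, getBang_eq_getD_nat, findIdxs_eq_pvSen]

-- the first entry of pvSen is 0 iff the list starts with a senior
lemma pvSen_head (student : List Int) (hc : 0 < (pvSen student).length) :
    (pvSen student).getD 0 0 = 0 ↔ student.getD 0 0 = 1 := by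
  constructor
  · intro h
    have := pvSen_senior (student := student) (j := 0) hc
    rw [← List.getD_eq_getElem _ _ hc, h] at this
    exact this
  · intro h
    have hn : 0 < student.length := by
      have := pvSen_lt (student := student) (j := 0) hc
      omega
    obtain ⟨t, ht, hte⟩ := pvSen_exists hn h
    have := pvSen_mono (student := student) (j := 0) (j' := t) ht (by omega)
    rw [List.getD_eq_getElem _ _ hc]
    omega

-- the last entry of pvSen is n-1 iff the list ends with a senior
lemma pvSen_last (student : List Int) (hc : 0 < (pvSen student).length) :
    (pvSen student).getD ((pvSen student).length - 1) 0 = student.length - 1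
      ↔ student.getD (student.length - 1) 0 = 1 := by
  have hl : (pvSen student).length - 1 < (pvSen student).length := by omega
  have hn : 0 < student.length := by
    have := pvSen_lt (student := student) (j := 0) hc
    omega
  constructor
  · intro h
    have := pvSen_senior (student := student) hl
    rw [← List.getD_eq_getElem _ _ hl, h] at this
    exact this
  · intro h
    obtain ⟨t, ht, hte⟩ := pvSen_exists (by omega : student.length - 1 < student.length) h
    have h1 := pvSen_mono (student := student) (j := t) (j' := (pvSen student).length - 1) hl
      (by omega)
    have h2 := pvSen_lt (student := student) hl
    rw [List.getD_eq_getElem _ _ hl]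
    omega

lemma pvP_lt (student : List Int) (j : Nat) (hc : j < (pvSen student).length) :
    pvP student j < ((pvSen student).getD j 0 : Int) := by
  unfold pvP
  rcases j with _ | j'
  · simp
    omega
  · rw [if_neg (by omega)]
    rw [List.getD_eq_getElem _ _ hc]
    have h3 := pvSen_strictMono (student := student) hc (j := j') (by omega)
    simp only [Nat.add_sub_cancel]
    rw [List.getD_eq_getElem _ _ (by omega : j' < (pvSen student).length)]
    exact_mod_cast h3

lemma lt_pvQ (student : List Int) (k : Int) (hk1 : 1 ≤ k) (j : Nat)
    (hj : j + k.toNat ≤ (pvSen student).length) :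
    ((pvSen student).getD (j + k.toNat - 1) 0 : Int) < pvQ student k j := by
  have h2 : j + k.toNat - 1 < (pvSen student).length := by omega
  unfold pvQ
  by_cases h : j + k.toNat = (pvSen student).length
  · rw [if_pos h]
    rw [List.getD_eq_getElem _ _ h2]
    exact_mod_cast pvSen_lt h2
  · rw [if_neg h]
    rw [List.getD_eq_getElem _ _ h2,
        List.getD_eq_getElem _ _ (by omega : j + k.toNat < (pvSen student).length)]
    exact_mod_cast pvSen_strictMono (by omega) (by omega)

lemma pvOver_nonneg (student : List Int) (k : Int) (hk1 : 1 ≤ k) (j : Nat)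
    (hj : j + k.toNat ≤ (pvSen student).length) : 0 ≤ pvOver student k j := by
  have h1 := pvP_lt student j (by omega)
  have h2 := lt_pvQ student k hk1 j hj
  unfold pvOver
  split_ifs <;> omega

lemma sum_pos_of_mem {l : List Nat} {f : Nat → Int} (h0 : ∀ x ∈ l, 0 ≤ f x)
    {x : Nat} (hx : x ∈ l) (hpos : 0 < f x) : 0 < (l.map f).sum := by
  induction l with
  | nil => cases hx
  | cons a t ih =>
      rw [List.map_cons, List.sum_cons]
      have ht0 : 0 ≤ (t.map f).sum :=
        List.sum_nonneg (by
          intro y hy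
          obtain ⟨z, hz, rfl⟩ := List.mem_map.mp hy
          exact h0 z (List.mem_cons_of_mem a hz))
      rcases List.mem_cons.mp hx with rfl | hx'
      · omega
      · have := ih (fun y hy => h0 y (List.mem_cons_of_mem a hy)) hx'
        have ha := h0 a List.mem_cons_self
        omega

-- a senior strictly between the (j+1)-st and (j+2)-nd senior positions cannot exist;
-- used through pvSen_exists/pvSen_mono below.
lemma pvOver_eq_zero (student : List Int) (k : Int)
    (hnd : ¬ D_solution student k) (hk1 : 1 ≤ k)
    (hkc : k ≤ ((pvSen student).length : Int))
    (j : Nat) (hj : j + k.toNat ≤ (pvSen student).length) :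
    pvOver student k j = 0 := by
  have hnC : ¬ (pvC1 student k ∨ pvC2 student k) :=
    fun h => hnd ((D_iff student k).mpr ⟨hk1, hkc, h⟩)
  push_neg at hnC
  obtain ⟨hn1, hn2⟩ := hnC
  unfold pvC1 at hn1
  unfold pvC2 at hn2
  push_neg at hn1
  push_neg at hn2
  unfold pvOver
  by_cases hS : (pvSen student).getD j 0 = 0
  · -- j = 0: the very first window starts at index 0
    have hj0 : j = 0 := by
      by_contra h0
      have h1 := pvSen_strictMono (student := student) (j := 0) (j' := j) (by omega) (by omega)
      rw [List.getD_eq_getElem _ _ (by omega : j < (pvSen student).length)] at hS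
      omega
    subst hj0
    rw [if_pos hS]
    simp only [Nat.zero_add]
    have hst0 : student.getD 0 0 = 1 := (pvSen_head student (by omega)).mp hS
    have hadj := hn1 hst0
    have hfl : k.toNat - 1 < (pvSen student).length := by omega
    have hfe : (pvSen student).getD (k.toNat - 1) 0 = (pvSen student)[k.toNat - 1]'hfl :=
      List.getD_eq_getElem _ _ hfl
    have hfn : (pvSen student)[k.toNat - 1]'hfl < student.length := pvSen_lt hfl
    have hf1n : (pvSen student)[k.toNat - 1]'hfl + 1 < student.length := by
      by_contra hge
      rw [hfe, List.getD_eq_default _ _ (by omega)] at hadj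
      omega
    rw [hfe] at hadj
    obtain ⟨t, ht, hte⟩ := pvSen_exists hf1n hadj
    have htk : k.toNat ≤ t := by
      by_contra hlt
      have := pvSen_mono (student := student) (j := t) (j' := k.toNat - 1) hfl (by omega)
      omega
    have hklt : k.toNat < (pvSen student).length := by omega
    have hskn : (pvSen student)[k.toNat]'hklt = (pvSen student)[k.toNat - 1]'hfl + 1 := by
      have h5 := pvSen_mono (student := student) (j := k.toNat) (j' := t) ht htk
      have h6 := pvSen_strictMono (student := student) (j := k.toNat - 1) (j' := k.toNat)
        hklt (by omega)
      omega
    have hFne : ¬ (pvSen student).getD (k.toNat - 1) 0 = student.length - 1 := by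
      rw [hfe]
      omega
    rw [if_neg hFne]
    have hQ : pvQ student k 0 = ((pvSen student)[k.toNat - 1]'hfl : Int) + 1 := by
      unfold pvQ
      rw [if_neg (by omega : ¬ 0 + k.toNat = (pvSen student).length)]
      simp only [Nat.zero_add]
      rw [List.getD_eq_getElem _ _ hklt]
      exact_mod_cast congrArg (fun m : Nat => (m : Int)) hskn
    rw [hQ, hfe]
    ring
  · rw [if_neg hS]
    by_cases hF : (pvSen student).getD (j + k.toNat - 1) 0 = student.length - 1
    · rw [if_pos hF]
      -- the last window: j + k = c
      have hjc : j + k.toNat = (pvSen student).length := by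
        by_contra hne
        have hlt : j + k.toNat < (pvSen student).length := by omega
        have h1 := pvSen_strictMono (student := student) (j := j + k.toNat - 1)
          (j' := j + k.toNat) hlt (by omega)
        have h2 := pvSen_lt (student := student) (j := j + k.toNat) hlt
        rw [List.getD_eq_getElem _ _ (by omega : j + k.toNat - 1 < (pvSen student).length)] at hF
        omega
      have hstl : student.getD (student.length - 1) 0 = 1 := by
        refine (pvSen_last student (by omega)).mp ?_
        rw [show (pvSen student).length - 1 = j + k.toNat - 1 from by omega]
        exact hF
      have hadj := hn2 hstl
      rw [show (pvSen student).length - k.toNat = j from by omega] at hadj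
      have hjl : j < (pvSen student).length := by omega
      have hse : (pvSen student).getD j 0 = (pvSen student)[j]'hjl :=
        List.getD_eq_getElem _ _ hjl
      have hS1 : 1 ≤ (pvSen student)[j]'hjl := by
        rw [hse] at hS
        omega
      have hprevn : (pvSen student)[j]'hjl - 1 < student.length := by
        have := pvSen_lt hjl
        omega
      rw [hse] at hadj
      have hsen : student.getD ((pvSen student)[j]'hjl - 1) 0 = 1 := hadj
      obtain ⟨t, ht, hte⟩ := pvSen_exists hprevn hsen
      have htj : t < j := by
        by_contra hge
        have := pvSen_mono (student := student) (j := j) (j' := t) ht (by omega)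
        omega
      have hj1 : 1 ≤ j := by omega
      have hjl1 : j - 1 < (pvSen student).length := by omega
      have hprev : (pvSen student)[j - 1]'hjl1 = (pvSen student)[j]'hjl - 1 := by
        have h5 := pvSen_mono (student := student) (j := t) (j' := j - 1) hjl1 (by omega)
        have h6 := pvSen_strictMono (student := student) (j := j - 1) (j' := j) hjl (by omega)
        omega
      have hPj : pvP student j = ((pvSen student)[j]'hjl : Int) - 1 := by
        unfold pvP
        rw [if_neg (by omega), List.getD_eq_getElem _ _ hjl1]
        rw [hprev]
        have : 1 ≤ (pvSen student)[j]'hjl := hS1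
        omega
      rw [hPj, hse]
      ring
    · rw [if_neg hF]

lemma pvOver_sum_pos (student : List Int) (k : Int) (hD : D_solution student k) :
    0 < ((List.range ((pvSen student).length - k.toNat + 1)).map (pvOver student k)).sum := by
  obtain ⟨hk1, hkc, hC⟩ := (D_iff student k).mp hD
  have h0 : ∀ x ∈ List.range ((pvSen student).length - k.toNat + 1), 0 ≤ pvOver student k x := by
    intro x hx
    simp only [List.mem_range] at hx
    exact pvOver_nonneg student k hk1 x (by omega)
  rcases hC with ⟨hS0, hgap⟩ | ⟨hSl, hgap⟩
  · -- the first window overcounts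
    refine sum_pos_of_mem h0 (x := 0) (by simp) ?_
    have hS : (pvSen student).getD 0 0 = 0 := by
      obtain ⟨t, ht, hte⟩ := pvSen_exists
        (by
          have := pvSen_lt (student := student) (j := 0) (by omega)
          omega : 0 < student.length) hS0
      have := pvSen_mono (student := student) (j := 0) (j' := t) ht (by omega)
      rw [List.getD_eq_getElem _ _ (by omega : 0 < (pvSen student).length)]
      omega
    unfold pvOver
    rw [if_pos hS]
    simp only [Nat.zero_add]
    by_cases hF : (pvSen student).getD (k.toNat - 1) 0 = student.length - 1
    · rw [if_pos hF]
      omega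
    · rw [if_neg hF]
      have hfl : k.toNat - 1 < (pvSen student).length := by omega
      have hfe : (pvSen student).getD (k.toNat - 1) 0 = (pvSen student)[k.toNat - 1]'hfl :=
        List.getD_eq_getElem _ _ hfl
      have hfn : (pvSen student)[k.toNat - 1]'hfl < student.length := pvSen_lt hfl
      have hQgt := lt_pvQ student k hk1 0 (by omega)
      simp only [Nat.zero_add] at hQgt
      have hQne : pvQ student k 0 ≠ ((pvSen student).getD (k.toNat - 1) 0 : Int) + 1 := by
        unfold pvQ
        by_cases h : 0 + k.toNat = (pvSen student).length
        · rw [if_pos h, hfe]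
          rw [hfe] at hF
          omega
        · rw [if_neg h]
          simp only [Nat.zero_add]
          have hklt : k.toNat < (pvSen student).length := by omega
          intro heq
          have heq' : (pvSen student)[k.toNat]'hklt = (pvSen student)[k.toNat - 1]'hfl + 1 := by
            rw [List.getD_eq_getElem _ _ hklt, hfe] at heq
            exact_mod_cast heq
          have hsen : student.getD ((pvSen student)[k.toNat - 1]'hfl + 1) 0 = 1 := by
            have := pvSen_senior (student := student) hklt
            rw [heq'] at this
            exact this
          rw [hfe] at hgap
          exact hgap hsen
      omega
  · -- the last window overcounts
    refine sum_pos_of_mem h0 (x := (pvSen student).length - k.toNat) (by simp) ?_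
    have hc1 : (pvSen student).getD ((pvSen student).length - 1) 0 = student.length - 1 :=
      (pvSen_last student (by omega)).mpr hSl
    have hidx : (pvSen student).length - k.toNat + k.toNat - 1 = (pvSen student).length - 1 := by
      omega
    unfold pvOver
    rw [hidx]
    by_cases hS : (pvSen student).getD ((pvSen student).length - k.toNat) 0 = 0
    · rw [if_pos hS, if_pos hc1]
      omega
    · rw [if_neg hS, if_pos hc1]
      have hjl : (pvSen student).length - k.toNat < (pvSen student).length := by omega
      have hse : (pvSen student).getD ((pvSen student).length - k.toNat) 0
          = (pvSen student)[(pvSen student).length - k.toNat]'hjl :=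
        List.getD_eq_getElem _ _ hjl
      have hPlt := pvP_lt student ((pvSen student).length - k.toNat) hjl
      have hPne : pvP student ((pvSen student).length - k.toNat)
          ≠ ((pvSen student).getD ((pvSen student).length - k.toNat) 0 : Int) - 1 := by
        unfold pvP
        by_cases h : (pvSen student).length - k.toNat = 0
        · rw [if_pos h]
          rw [h] at hS ⊢
          omega
        · rw [if_neg h]
          intro heq
          have hjl1 : (pvSen student).length - k.toNat - 1 < (pvSen student).length := by omega
          have heq' : (pvSen student)[(pvSen student).length - k.toNat - 1]'hjl1
              = (pvSen student)[(pvSen student).length - k.toNat]'hjl - 1 := by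
            rw [List.getD_eq_getElem _ _ hjl1, hse] at heq
            rw [hse] at hS
            omega
          have hsen : student.getD
              ((pvSen student)[(pvSen student).length - k.toNat]'hjl - 1) 0 = 1 := by
            have := pvSen_senior (student := student) hjl1
            rw [heq'] at this
            exact this
          rw [hse] at hgap
          exact hgap hsen
      omega

-- ===== VERDICT (by name: the statement is the Claim_ definition above) =====
theorem solution_spec : Claim_unchanged_solution := by
  intro student k _ hpre
  unfold Spec_solution
  intro hnd
  by_cases hk1 : 1 ≤ k
  · by_cases hkc : k ≤ ((pvSen student).length : Int)
    · rw [main_eq student k hk1 hkc]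
      have hz : ((List.range ((pvSen student).length - k.toNat + 1)).map (pvOver student k)).sum
          = 0 := by
        apply List.sum_eq_zero
        intro x hx
        obtain ⟨j, hj, rfl⟩ := List.mem_map.mp hx
        simp only [List.mem_range] at hj
        exact pvOver_eq_zero student k hnd hk1 hkc j (by omega)
      rw [hz]
      ring
    · rw [sol_zero_small student k (by omega), alt_zero student k (Or.inr (by omega))]
  · have hc0 : (pvSen student).length = 0 := by
      rcases hpre with h | h
      · omega
      · rw [count_eq_len] at h
        exact h
    rw [sol_zero_neg student k (by omega) hc0, alt_zero student k (Or.inl (by omega))]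
theorem solution_changed : Claim_changed_solution := by unfold Claim_changed_solution; decide
theorem solution_tight : Claim_exact_solution := by
  intro student k _ _ hD
  obtain ⟨hk1, hkc, _⟩ := (D_iff student k).mp hD
  have hpos := pvOver_sum_pos student k hD
  rw [main_eq student k hk1 hkc]
  omega
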